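-- pv_equiv track=rewrite | github.com/lnk-zone/cinegraph | backend/benchmark_story_ingestion.py | generate_test_story
-- ===== SOURCE A (Python) =====
-- def generate_test_story(word_count: int = 2000) -> str:
--     """Generate a test story with approximately the specified word count"""
--
--     base_story = """
--     The brave knight Sir Gallant rode through the enchanted forest on his noble steed.
--     The ancient trees whispered secrets of old magic, and mystical creatures watched from
--     the shadows. His quest was to find the legendary Crystal of Eternal Light, hidden
--     deep within the Dragon's Lair.
--
--     Along his journey, Sir Gallant met a wise old hermit who lived in a stone cottage
--     beside a babbling brook. The hermit, named Eldric, possessed knowledge of ancient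
--     spells and the location of the dragon's treasure. He warned Sir Gallant about the
--     perils ahead and gave him a magical amulet for protection.
--
--     As Sir Gallant continued deeper into the forest, he encountered a group of bandits
--     who had been terrorizing local villages. Using his sword skills and quick thinking,
--     he defeated the bandits and freed their captives. Among the rescued was a young
--     princess named Aria, who had been kidnapped from the nearby Kingdom of Astoria.
--
--     Princess Aria revealed that she too was seeking the Crystal of Eternal Light, as
--     it was the only thing that could save her kingdom from a terrible curse. Together,
--     they formed an alliance and continued toward the dragon's lair, facing many
--     challenges along the way.
--
--     The dragon, a massive creature with scales like emeralds and eyes like burning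
--     coals, guarded the crystal jealously. The battle was fierce and dangerous, but
--     Sir Gallant and Princess Aria worked together to defeat the beast and claim the
--     crystal. With the crystal in hand, they returned to Astoria and lifted the curse,
--     saving the kingdom and its people.
--     """
--
--     # Repeat and extend the base story to reach the target word count
--     words = base_story.split()
--     current_words = len(words)
--
--     if current_words >= word_count:
--         return ' '.join(words[:word_count])
--
--     # Extend the story by repeating and modifying sections
--     extensions = [
--         "The celebration in the kingdom lasted for days. People came from far and wide to honor the heroes.",
--         "Sir Gallant was knighted as the Royal Champion, and Princess Aria became the beloved ruler of Astoria.",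
--         "The crystal was placed in the kingdom's treasury, where it would protect the land for generations to come.",
--         "New adventures awaited our heroes, as rumors of other mystical artifacts began to spread throughout the realm.",
--         "The enchanted forest remained a place of wonder and mystery, where future heroes would test their courage.",
--         "Eldric the hermit continued to help travelers, sharing his wisdom with those who sought to do good in the world.",
--         "The defeated dragon's lair became a sacred site, where pilgrims would come to pray for strength and guidance.",
--         "Trade routes reopened between kingdoms, bringing prosperity and peace to the land once again.",
--         "The tale of Sir Gallant and Princess Aria became legend, inspiring young knights and princesses everywhere.",
--         "Magic flowed more freely through the land, blessing crops and bringing good fortune to all who lived there."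
--     ]
--
--     result = base_story
--     extension_index = 0
--
--     while len(result.split()) < word_count:
--         result += "\n\n" + extensions[extension_index % len(extensions)]
--         extension_index += 1
--
--     # Trim to exact word count
--     final_words = result.split()[:word_count]
--     return ' '.join(final_words)
-- ===== SOURCE B (Python) =====
-- _BASE_STORY = """
--     The brave knight Sir Gallant rode through the enchanted forest on his noble steed.
--     The ancient trees whispered secrets of old magic, and mystical creatures watched from
--     the shadows. His quest was to find the legendary Crystal of Eternal Light, hidden
--     deep within the Dragon's Lair.
--
--     Along his journey, Sir Gallant met a wise old hermit who lived in a stone cottage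
--     beside a babbling brook. The hermit, named Eldric, possessed knowledge of ancient
--     spells and the location of the dragon's treasure. He warned Sir Gallant about the
--     perils ahead and gave him a magical amulet for protection.
--
--     As Sir Gallant continued deeper into the forest, he encountered a group of bandits
--     who had been terrorizing local villages. Using his sword skills and quick thinking,
--     he defeated the bandits and freed their captives. Among the rescued was a young
--     princess named Aria, who had been kidnapped from the nearby Kingdom of Astoria.
--
--     Princess Aria revealed that she too was seeking the Crystal of Eternal Light, as
--     it was the only thing that could save her kingdom from a terrible curse. Together,
--     they formed an alliance and continued toward the dragon's lair, facing many
--     challenges along the way.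
--
--     The dragon, a massive creature with scales like emeralds and eyes like burning
--     coals, guarded the crystal jealously. The battle was fierce and dangerous, but
--     Sir Gallant and Princess Aria worked together to defeat the beast and claim the
--     crystal. With the crystal in hand, they returned to Astoria and lifted the curse,
--     saving the kingdom and its people.
--     """
--
-- _EXTENSIONS = [
--     "The celebration in the kingdom lasted for days. People came from far and wide to honor the heroes.",
--     "Sir Gallant was knighted as the Royal Champion, and Princess Aria became the beloved ruler of Astoria.",
--     "The crystal was placed in the kingdom's treasury, where it would protect the land for generations to come.",
--     "New adventures awaited our heroes, as rumors of other mystical artifacts began to spread throughout the realm.",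
--     "The enchanted forest remained a place of wonder and mystery, where future heroes would test their courage.",
--     "Eldric the hermit continued to help travelers, sharing his wisdom with those who sought to do good in the world.",
--     "The defeated dragon's lair became a sacred site, where pilgrims would come to pray for strength and guidance.",
--     "Trade routes reopened between kingdoms, bringing prosperity and peace to the land once again.",
--     "The tale of Sir Gallant and Princess Aria became legend, inspiring young knights and princesses everywhere.",
--     "Magic flowed more freely through the land, blessing crops and bringing good fortune to all who lived there."
-- ]
--
--
-- def generate_test_story(word_count: int = 2000) -> str:
--     """Generate a test story with approximately the specified word count"""
--     base_words = _BASE_STORY.split()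
--     if len(base_words) >= word_count:
--         return ' '.join(base_words[:word_count])
--     # Draw exactly the missing number of words from the cycled extensions,
--     # computed up front: no growing string, no repeated re-splitting.
--     ext_words = ' '.join(_EXTENSIONS).split()
--     needed = word_count - len(base_words)
--     reps = -(-needed // len(ext_words))
--     return ' '.join(base_words + (ext_words * reps)[:needed])
-- ===== Notes on version B (the rewrite author's own statement) =====
-- stated objective: faster
-- what changed: B computes the exact number of missing words up front and takes them from the flattened, replicated extension word list in one step, instead of A's while loop that appends one extension at a time and re-splits the entire growing string on every iteration.
import Mathlib
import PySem

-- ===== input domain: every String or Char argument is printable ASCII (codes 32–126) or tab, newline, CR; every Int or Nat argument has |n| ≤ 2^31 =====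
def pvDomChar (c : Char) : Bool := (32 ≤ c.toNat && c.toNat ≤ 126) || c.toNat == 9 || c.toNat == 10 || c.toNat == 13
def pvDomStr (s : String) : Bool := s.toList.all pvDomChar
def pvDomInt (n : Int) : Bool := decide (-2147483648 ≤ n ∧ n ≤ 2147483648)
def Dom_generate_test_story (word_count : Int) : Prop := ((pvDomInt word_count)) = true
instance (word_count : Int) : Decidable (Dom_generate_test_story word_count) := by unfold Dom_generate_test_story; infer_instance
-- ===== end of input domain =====

set_option maxRecDepth 100000
set_option maxHeartbeats 1600000

-- B computes the number of missing words up front and takes them from the repeated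
-- extension word list in one step, instead of A's append-and-resplit while loop.

def pvBase : List Char :=
  ("\n    The brave knight Sir Gallant rode through the enchanted forest on his noble steed. \n    The ancient trees whispered secrets of old magic, and mystical creatures watched from \n    the shadows. His quest was to find the legendary Crystal of Eternal Light, hidden \n    deep within the Dragon's Lair.\n    \n    Along his journey, Sir Gallant met a wise old hermit who lived in a stone cottage \n    beside a babbling brook. The hermit, named Eldric, possessed knowledge of ancient \n    spells and the location of the dragon's treasure. He warned Sir Gallant about the \n    perils ahead and gave him a magical amulet for protection.\n    \n    As Sir Gallant continued deeper into the forest, he encountered a group of bandits \n    who had been terrorizing local villages. Using his sword skills and quick thinking, \n    he defeated the bandits and freed their captives. Among the rescued was a young \n    princess named Aria, who had been kidnapped from the nearby Kingdom of Astoria.\n    \n    Princess Aria revealed that she too was seeking the Crystal of Eternal Light, as \n    it was the only thing that could save her kingdom from a terrible curse. Together, \n    they formed an alliance and continued toward the dragon's lair, facing many \n    challenges along the way.\n    \n    The dragon, a massive creature with scales like emeralds and eyes like burning \n    coals, guarded the crystal jealously. The battle was fierce and dangerous, but \n    Sir Gallant and Princess Aria worked together to defeat the beast and claim the \n    crystal.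 With the crystal in hand, they returned to Astoria and lifted the curse, \n    saving the kingdom and its people.\n    ").toList

def pvExts : List (List Char) :=
  ["The celebration in the kingdom lasted for days. People came from far and wide to honor the heroes.".toList,
   "Sir Gallant was knighted as the Royal Champion, and Princess Aria became the beloved ruler of Astoria.".toList,
   "The crystal was placed in the kingdom's treasury, where it would protect the land for generations to come.".toList,
   "New adventures awaited our heroes, as rumors of other mystical artifacts began to spread throughout the realm.".toList,
   "The enchanted forest remained a place of wonder and mystery, where future heroes would test their courage.".toList,
   "Eldric the hermit continued to help travelers, sharing his wisdom with those who sought to do good in the world.".toList,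
   "The defeated dragon's lair became a sacred site, where pilgrims would come to pray for strength and guidance.".toList,
   "Trade routes reopened between kingdoms, bringing prosperity and peace to the land once again.".toList,
   "The tale of Sir Gallant and Princess Aria became legend, inspiring young knights and princesses everywhere.".toList,
   "Magic flowed more freely through the land, blessing crops and bringing good fortune to all who lived there.".toList]

-- ===== PORT A =====
-- Lemmas about Python str.split() on an append, needed by the loop's termination proof.
theorem pv_go_acc (s : List Char) : ∀ (cur : List Char) (acc : List (List Char)),
    PySem.Chars.split₀.go s cur acc = acc.reverse ++ PySem.Chars.split₀.go s cur [] := by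
  induction s with
  | nil =>
    intro cur acc
    simp only [PySem.Chars.split₀.go]
    split_ifs <;> simp
  | cons c rest ih =>
    intro cur acc
    simp only [PySem.Chars.split₀.go]
    split_ifs with h1 h2
    · rw [ih [] acc]
    · rw [ih [] (cur.reverse :: acc), ih [] [cur.reverse]]
      simp
    · rw [ih (c :: cur) acc]

theorem pv_go_ws (w : Char) (hw : PySem.Chars.isspace w = true) (t : List Char)
    (s : List Char) : ∀ (cur : List Char) (acc : List (List Char)),
    PySem.Chars.split₀.go (s ++ w :: t) cur acc
      = PySem.Chars.split₀.go s cur acc ++ PySem.Chars.split₀.go t [] [] := by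
  induction s with
  | nil =>
    intro cur acc
    simp only [List.nil_append, PySem.Chars.split₀.go, hw, if_true]
    split_ifs with h
    · rw [pv_go_acc t [] acc]
    · rw [pv_go_acc t [] (cur.reverse :: acc)]
  | cons c rest ih =>
    intro cur acc
    simp only [List.cons_append, PySem.Chars.split₀.go]
    split_ifs with h1 h2
    · rw [ih [] acc]
    · rw [ih [] (cur.reverse :: acc)]
    · rw [ih (c :: cur) acc]

theorem pv_split_ws1 (a b : List Char) (w : Char) (hw : PySem.Chars.isspace w = true) :
    PySem.Chars.split₀ (a ++ w :: b) = PySem.Chars.split₀ a ++ PySem.Chars.split₀ b := by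
  unfold PySem.Chars.split₀
  exact pv_go_ws w hw b a [] []

theorem pv_split_nl2 (a b : List Char) :
    PySem.Chars.split₀ (a ++ '\n' :: '\n' :: b) = PySem.Chars.split₀ a ++ PySem.Chars.split₀ b := by
  have h1 := pv_split_ws1 a ('\n' :: b) '\n' (by decide)
  have h2 := pv_split_ws1 [] b '\n' (by decide)
  simp only [List.nil_append] at h2
  rw [h1, h2]
  rfl

theorem pv_exts_length : pvExts.length = 10 := rfl

theorem pv_ext_len (i : Nat) : 1 ≤ (PySem.Chars.split₀ (pvExts[i % pvExts.length]!)).length := by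
  rw [pv_exts_length]
  have h : i % 10 < 10 := Nat.mod_lt _ (by omega)
  set j := i % 10 with hj
  interval_cases j <;> decide

-- The while loop of A, recomputing len(result.split()) each iteration, as in the Python.
def pvLoopA (word_count : Int) (result : List Char) (extension_index : Nat) : List Char :=
  if ((PySem.Chars.split₀ result).length : Int) < word_count then
    pvLoopA word_count (result ++ '\n' :: '\n' :: pvExts[extension_index % pvExts.length]!)
      (extension_index + 1)
  else result
termination_by (word_count - (PySem.Chars.split₀ result).length).toNat
decreasing_by
  rename_i h
  rw [pv_split_nl2]
  have he := pv_ext_len extension_index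
  simp only [List.length_append]
  omega

def generate_test_story (word_count : Int) : String :=
  let words := PySem.Chars.split₀ pvBase
  let current_words : Int := words.length
  if current_words ≥ word_count then
    String.ofList (PySem.Chars.join [' '] (PySem.List.slice words none (some word_count)))
  else
    let result := pvLoopA word_count pvBase 0
    let final_words := PySem.List.slice (PySem.Chars.split₀ result) none (some word_count)
    String.ofList (PySem.Chars.join [' '] final_words)

-- ===== PORT B =====
-- Python's list * int (replication; empty for non-positive counts).
def pyListMul {α : Type} (l : List α) (n : Int) : List α := (List.replicate n.toNat l).flatten

def generate_test_story_alt (word_count : Int) : String :=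
  let base_words := PySem.Chars.split₀ pvBase
  if ((base_words.length : Int)) ≥ word_count then
    String.ofList (PySem.Chars.join [' '] (PySem.List.slice base_words none (some word_count)))
  else
    let ext_words := PySem.Chars.split₀ (PySem.Chars.join [' '] pvExts)
    let needed : Int := word_count - base_words.length
    let reps : Int := -(PySem.Int.floordiv (-needed) ext_words.length)
    String.ofList (PySem.Chars.join [' ']
      (base_words ++ PySem.List.slice (pyListMul ext_words reps) none (some needed)))

-- ===== PRECONDITION & SPEC =====
def Spec_generate_test_story (word_count : Int) (out : String) : Prop := out = generate_test_story_alt word_count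
instance (word_count : Int) (out : String) : Decidable (Spec_generate_test_story word_count out) := by unfold Spec_generate_test_story; infer_instance

-- ===== CLAIM (what is proved, stated in full; the proofs are below) =====
def Claim_equal_generate_test_story : Prop := ∀ (word_count : Int), Dom_generate_test_story word_count → Spec_generate_test_story word_count (generate_test_story word_count)

-- ===== LEMMAS AND PROOFS =====

-- words contributed by extension number i
def pvExtW (i : Nat) : List (List Char) := PySem.Chars.split₀ (pvExts[i % 10]!)
-- words appended after k iterations of A's loop
def pvG (k : Nat) : List (List Char) := ((List.range k).map pvExtW).flatten
-- A's result string after k iterations of the loop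
def pvStr (k : Nat) : List Char :=
  pvBase ++ ((List.range k).map (fun i => '\n' :: '\n' :: pvExts[i % 10]!)).flatten
-- all extensions' words, one round
def pvExtFlat : List (List Char) := (pvExts.map PySem.Chars.split₀).flatten

theorem pvStr_zero : pvStr 0 = pvBase := by simp [pvStr]

theorem pvStr_succ (k : Nat) : pvStr (k+1) = pvStr k ++ '\n' :: '\n' :: pvExts[k % 10]! := by
  simp [pvStr, List.range_succ]

theorem pvG_succ (k : Nat) : pvG (k+1) = pvG k ++ pvExtW k := by
  simp [pvG, List.range_succ]

theorem pv_split_pvStr (k : Nat) :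
    PySem.Chars.split₀ (pvStr k) = PySem.Chars.split₀ pvBase ++ pvG k := by
  induction k with
  | zero => simp [pvStr_zero, pvG]
  | succ k ih =>
    rw [pvStr_succ, pv_split_nl2, ih, pvG_succ, List.append_assoc]
    rfl

theorem pvExtW_len (i : Nat) : 1 ≤ (pvExtW i).length := by
  have := pv_ext_len i
  rwa [pv_exts_length] at this

theorem pvLoopA_ex (wc : Int) : ∀ (n : Nat) (k : Nat),
    (wc - ((PySem.Chars.split₀ pvBase).length + (pvG k).length : Int)).toNat = n →
    ∃ K : Nat, pvLoopA wc (pvStr k) k = pvStr K ∧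
      wc ≤ ((PySem.Chars.split₀ pvBase).length : Int) + (pvG K).length := by
  intro n
  induction n using Nat.strong_induction_on with
  | _ n ih =>
    intro k hk
    rw [pvLoopA]
    by_cases h : ((PySem.Chars.split₀ (pvStr k)).length : Int) < wc
    · rw [if_pos h]
      have hstep : pvStr k ++ '\n' :: '\n' :: pvExts[k % pvExts.length]! = pvStr (k+1) := by
        rw [pv_exts_length, pvStr_succ]
      rw [hstep]
      have hlen : (pvG (k+1)).length = (pvG k).length + (pvExtW k).length := by
        rw [pvG_succ, List.length_append]
      have hext := pvExtW_len k
      rw [pv_split_pvStr k, List.length_append] at h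
      have hm : (wc - ((PySem.Chars.split₀ pvBase).length + (pvG (k+1)).length : Int)).toNat < n := by
        omega
      exact ih _ hm (k+1) rfl
    · rw [if_neg h]
      rw [pv_split_pvStr k, List.length_append] at h
      exact ⟨k, rfl, by push_cast at h; omega⟩

theorem pvG_add (a b : Nat) :
    pvG (a + b) = pvG a ++ ((List.range b).map (fun i => pvExtW (a + i))).flatten := by
  simp [pvG, List.range_add, List.map_map, Function.comp_def]

theorem pvG_prefix {k m : Nat} (h : k ≤ m) : pvG k <+: pvG m := by
  obtain ⟨b, rfl⟩ := Nat.exists_eq_add_of_le h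
  rw [pvG_add]
  exact List.prefix_append _ _

theorem pv_block (a : Nat) (ha : a % 10 = 0) :
    ((List.range 10).map (fun i => pvExtW (a + i))).flatten = pvExtFlat := by
  have hc : ∀ i ∈ List.range 10, pvExtW (a + i) = pvExtW i := by
    intro i hi
    have : (a + i) % 10 = i % 10 := by omega
    simp [pvExtW, this]
  rw [List.map_congr_left hc]
  rfl

theorem pvG_period (m : Nat) : pvG (10 * m) = (List.replicate m pvExtFlat).flatten := by
  induction m with
  | zero => simp [pvG]
  | succ m ih =>
    have h10 : 10 * (m + 1) = 10 * m + 10 := by ring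
    rw [h10, pvG_add, ih, pv_block (10 * m) (by omega), List.replicate_succ']
    simp

theorem pv_joinsplit : ∀ l : List (List Char), l ≠ [] →
    PySem.Chars.split₀ (PySem.Chars.join [' '] l) = (l.map PySem.Chars.split₀).flatten := by
  intro l hl
  induction l with
  | nil => exact absurd rfl hl
  | cons x tl ih =>
    cases tl with
    | nil => simp [PySem.Chars.join_singleton]
    | cons y tl' =>
      rw [PySem.Chars.join_cons_cons]
      have hx : x ++ [' '] ++ PySem.Chars.join [' '] (y :: tl')
          = x ++ ' ' :: PySem.Chars.join [' '] (y :: tl') := by simp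
      rw [hx, pv_split_ws1 _ _ ' ' (by decide), ih (by simp)]
      simp

theorem pv_extWords : PySem.Chars.split₀ (PySem.Chars.join [' '] pvExts) = pvExtFlat := by
  rw [pv_joinsplit pvExts (by simp [pvExts])]
  rfl

theorem pv_extFlat_pos : 0 < pvExtFlat.length := by
  have h := pvExtW_len 0
  have heq : pvExtFlat
      = PySem.Chars.split₀ (pvExts[0]!) ++ ((pvExts.drop 1).map PySem.Chars.split₀).flatten := rfl
  have h0 : pvExtW 0 = PySem.Chars.split₀ (pvExts[0]!) := by simp [pvExtW]
  rw [heq, List.length_append]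
  rw [h0] at h
  omega

theorem pv_take_prefix {α : Type} {l L : List α} (h : l <+: L) {d : Nat} (hd : d ≤ l.length) :
    L.take d = l.take d := by
  obtain ⟨t, rfl⟩ := h
  exact List.take_append_of_le_length hd

theorem pv_ceil (a L : Int) (hL : 0 < L) (ha : 1 ≤ a) :
    a ≤ L * (-(PySem.Int.floordiv (-a) L)) ∧ 1 ≤ -(PySem.Int.floordiv (-a) L) := by
  simp only [PySem.Int.floordiv]
  have hfd : (-a).fdiv L = (-a) / L := by
    rw [Int.fdiv_eq_ediv]
    simp [hL.le]
  rw [hfd]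
  set q := (-a) / L with hq
  have h1 := Int.ediv_add_emod (-a) L
  have h2 := Int.emod_nonneg (-a) (by omega : L ≠ 0)
  rw [← hq] at h1
  have hq0 : q < 0 := by
    by_contra hcon
    push_neg at hcon
    have : 0 ≤ L * q := mul_nonneg (by omega) hcon
    omega
  constructor
  · have hr : L * (-q) = -(L * q) := by ring
    omega
  · omega

-- length of a replicated flatten
theorem pv_replen {α : Type} (l : List α) (n : Nat) :
    ((List.replicate n l).flatten).length = n * l.length := by
  simp [List.length_flatten, List.map_replicate]

-- ===== VERDICT (by name: the statement is the Claim_ definition above) =====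
theorem generate_test_story_spec : Claim_equal_generate_test_story := by
  intro wc _hdom
  unfold Spec_generate_test_story generate_test_story generate_test_story_alt
  by_cases hb : ((PySem.Chars.split₀ pvBase).length : Int) ≥ wc
  · simp only [ge_iff_le]
    rw [if_pos (by exact_mod_cast hb), if_pos (by exact_mod_cast hb)]
  · simp only [ge_iff_le]
    rw [if_neg (by exact_mod_cast hb), if_neg (by exact_mod_cast hb)]
    push_neg at hb
    -- abbreviations
    set N : Int := ((PySem.Chars.split₀ pvBase).length : Int) with hN
    have hN0 : 0 ≤ N := by positivity
    have hwc0 : 0 ≤ wc := by omega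
    -- run the loop
    obtain ⟨K, hK, hKlen⟩ := pvLoopA_ex wc _ 0 rfl
    rw [show pvBase = pvStr 0 from pvStr_zero.symm, hK, pv_split_pvStr K]
    -- B-side constants
    rw [pv_extWords]
    set needed : Int := wc - N with hneed
    have hneed1 : 1 ≤ needed := by omega
    obtain ⟨hceil, hreps1⟩ := pv_ceil needed ((pvExtFlat.length : Int)) (by exact_mod_cast pv_extFlat_pos) hneed1
    set reps : Int := -(PySem.Int.floordiv (-needed) ((pvExtFlat.length : Int))) with hreps
    -- both slices are takes
    rw [PySem.List.slice_to _ hwc0, PySem.List.slice_to _ (by omega : (0:Int) ≤ needed)]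
    -- A side: take wc = base ++ take needed
    have htakeA : (PySem.Chars.split₀ pvBase ++ pvG K).take wc.toNat
        = PySem.Chars.split₀ pvBase ++ (pvG K).take needed.toNat := by
      rw [List.take_append, List.take_of_length_le (by omega)]
      have h2 : wc.toNat - (PySem.Chars.split₀ pvBase).length = needed.toNat := by omega
      rw [h2]
    rw [htakeA]
    -- reduce to equality of the two takes
    have hdK : needed.toNat ≤ (pvG K).length := by omega
    have hdR : needed.toNat ≤ (pvG (10 * reps.toNat)).length := by
      rw [pvG_period, pv_replen]
      have : (reps.toNat : Int) = reps := by omega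
      have hle : needed ≤ (reps.toNat : Int) * (pvExtFlat.length : Int) := by
        rw [this]; linarith [hceil]
      exact_mod_cast (by push_cast at hle ⊢; omega : (needed.toNat : Int) ≤ ((reps.toNat * pvExtFlat.length : Nat) : Int))
    have hmul : pyListMul pvExtFlat reps = pvG (10 * reps.toNat) := by
      rw [pvG_period]; rfl
    rw [hmul]
    have hM1 : (pvG K).take needed.toNat = (pvG (max K (10 * reps.toNat))).take needed.toNat :=
      (pv_take_prefix (pvG_prefix (Nat.le_max_left _ _)) hdK).symm
    have hM2 : (pvG (10 * reps.toNat)).take needed.toNat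
        = (pvG (max K (10 * reps.toNat))).take needed.toNat :=
      (pv_take_prefix (pvG_prefix (Nat.le_max_right _ _)) hdR).symm
    rw [hM1, hM2, pvStr_zero]
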